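-- pv_equiv track=rewrite | github.com/SamoraDC/FinancialAuditAgenticSystem | config/langraph/checkpoint.py | _extract_compliance_flags
-- ===== SOURCE A (Python) =====
-- from typing import Optional, Dict, Any
--
-- def _extract_compliance_flags(state: Dict[str, Any]) -> list:
--     """Extract compliance-relevant flags from state"""
--     flags = []
--
--     if state:
--         # Check for SOX-related data
--         if any(key.lower().startswith('sox') for key in state.keys()):
--             flags.append('SOX')
--
--         # Check for financial data
--         if any(key.lower() in ['financial_data', 'transactions', 'amounts']
--                for key in state.keys()):
--             flags.append('FINANCIAL')
--
--         # Check for audit findings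
--         if 'findings' in state or 'anomalies' in state:
--             flags.append('AUDIT_FINDINGS')
--
--     return flags
-- ===== SOURCE B (Python) =====
-- def _extract_compliance_flags(state):
--     """Extract compliance-relevant flags from state"""
--     sox = financial = audit = False
--     for key in state:
--         kl = key.lower()
--         sox = sox or kl.startswith('sox')
--         financial = financial or kl in ('financial_data', 'transactions', 'amounts')
--         audit = audit or key in ('findings', 'anomalies')
--     flags = []
--     if sox:
--         flags.append('SOX')
--     if financial:
--         flags.append('FINANCIAL')
--     if audit:
--         flags.append('AUDIT_FINDINGS')
--     return flags
-- ===== Notes on version B (the rewrite author's own statement) =====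
-- stated objective: simpler
-- what changed: Replaces A's three separate scans over the keys (two any() generators plus two membership tests) with a single pass that accumulates three booleans, then emits the flags in fixed order; the 'if state' guard disappears since an empty dict yields no flags anyway.
import Mathlib
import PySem

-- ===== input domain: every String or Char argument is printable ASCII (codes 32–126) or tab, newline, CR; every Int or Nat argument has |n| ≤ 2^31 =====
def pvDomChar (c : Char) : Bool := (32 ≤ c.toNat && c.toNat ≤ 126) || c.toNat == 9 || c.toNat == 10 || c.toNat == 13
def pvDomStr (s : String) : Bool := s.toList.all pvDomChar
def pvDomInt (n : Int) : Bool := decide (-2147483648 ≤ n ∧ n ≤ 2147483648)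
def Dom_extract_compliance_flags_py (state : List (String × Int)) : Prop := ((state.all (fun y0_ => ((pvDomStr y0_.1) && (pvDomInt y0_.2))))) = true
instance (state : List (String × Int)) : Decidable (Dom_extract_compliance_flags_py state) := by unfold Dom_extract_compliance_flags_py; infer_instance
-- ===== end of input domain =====

-- B replaces A's three separate key scans by one accumulating pass (simpler decomposition);
-- equivalence of return values is proved for all inputs (A is total).

-- ===== PORT A =====
-- flags = []; three conditional appends, each scanning the keys, guarded by 'if state:'.
def extract_compliance_flags_py (state : List (String × Int)) : List String :=
  let flags : List String := []
  if state.isEmpty then flags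
  else
    let flags := if (state.map (·.1)).any
        (fun k => PySem.Str.startswith (PySem.Str.lower k) "sox") then flags ++ ["SOX"] else flags
    let flags := if (state.map (·.1)).any
        (fun k => PySem.Str.lower k ∈ ["financial_data", "transactions", "amounts"]) then
        flags ++ ["FINANCIAL"] else flags
    let flags := if (state.map (·.1)).contains "findings" || (state.map (·.1)).contains "anomalies" then
        flags ++ ["AUDIT_FINDINGS"] else flags
    flags

-- ===== PORT B =====
-- one fold over the keys maintaining three booleans, then emit the flags in fixed order.
def extract_compliance_flags_py_alt (state : List (String × Int)) : List String :=
  let acc := (state.map (·.1)).foldl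
    (fun (acc : Bool × Bool × Bool) k =>
      (acc.1 || PySem.Str.startswith (PySem.Str.lower k) "sox",
       acc.2.1 || decide (PySem.Str.lower k ∈ ["financial_data", "transactions", "amounts"]),
       acc.2.2 || (k == "findings" || k == "anomalies")))
    (false, false, false)
  (if acc.1 then ["SOX"] else []) ++
  (if acc.2.1 then ["FINANCIAL"] else []) ++
  (if acc.2.2 then ["AUDIT_FINDINGS"] else [])

-- ===== PRECONDITION & SPEC =====
def Spec_extract_compliance_flags_py (state : List (String × Int)) (out : List String) : Prop := out = extract_compliance_flags_py_alt state
instance (state : List (String × Int)) (out : List String) : Decidable (Spec_extract_compliance_flags_py state out) := by unfold Spec_extract_compliance_flags_py; infer_instance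

-- ===== CLAIM (what is proved, stated in full; the proofs are below) =====
def Claim_equal_extract_compliance_flags_py : Prop := ∀ (state : List (String × Int)), Dom_extract_compliance_flags_py state → Spec_extract_compliance_flags_py state (extract_compliance_flags_py state)

-- ===== LEMMAS AND PROOFS =====

-- the accumulating fold computes the three any-scans at once
theorem foldl_three_or (l : List String) (a b c : Bool) :
    l.foldl (fun (acc : Bool × Bool × Bool) k =>
      (acc.1 || PySem.Str.startswith (PySem.Str.lower k) "sox",
       acc.2.1 || decide (PySem.Str.lower k ∈ ["financial_data", "transactions", "amounts"]),
       acc.2.2 || (k == "findings" || k == "anomalies")))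
      (a, b, c)
    = (a || l.any (fun k => PySem.Str.startswith (PySem.Str.lower k) "sox"),
       b || l.any (fun k => decide (PySem.Str.lower k ∈ ["financial_data", "transactions", "amounts"])),
       c || l.any (fun k => k == "findings" || k == "anomalies")) := by
  induction l generalizing a b c with
  | nil => simp
  | cons h t ih =>
    rw [List.foldl_cons]
    exact (ih (a || PySem.Str.startswith (PySem.Str.lower h) "sox")
      (b || decide (PySem.Str.lower h ∈ ["financial_data", "transactions", "amounts"]))
      (c || (h == "findings" || h == "anomalies"))).trans (by
        simp only [List.any_cons, Bool.or_assoc])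

-- the two membership tests of A equal the combined per-key test of B
theorem contains_or_eq_any (l : List String) :
    (l.contains "findings" || l.contains "anomalies")
      = l.any (fun k => k == "findings" || k == "anomalies") := by
  rw [Bool.eq_iff_iff]
  simp only [Bool.or_eq_true, List.any_eq_true, List.contains_iff_mem, beq_iff_eq]
  constructor
  · rintro (h | h) <;> [exact ⟨_, h, Or.inl rfl⟩; exact ⟨_, h, Or.inr rfl⟩]
  · rintro ⟨k, hk, rfl | rfl⟩ <;> [exact Or.inl hk; exact Or.inr hk]

theorem extract_compliance_flags_py_eq (state : List (String × Int)) :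
    extract_compliance_flags_py state = extract_compliance_flags_py_alt state := by
  unfold extract_compliance_flags_py extract_compliance_flags_py_alt
  rw [foldl_three_or, ← contains_or_eq_any]
  cases state with
  | nil => simp
  | cons h t =>
    simp only [List.isEmpty_cons, Bool.false_or]
    split_ifs <;> simp_all

-- ===== VERDICT (by name: the statement is the Claim_ definition above) =====
theorem extract_compliance_flags_py_spec : Claim_equal_extract_compliance_flags_py := by
  intro state _
  exact extract_compliance_flags_py_eq state
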